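-- pv_equiv track=rewrite | github.com/ajangid007/advent_of_code_2021 | day4/part2.py | winningColumns
-- ===== SOURCE A (Python) =====
-- def winningColumns(board):
--     columns = [True] * len(board[0])
--     for i in range(len(board[0])):
--         for element in [row[i] for row in board]:
--             if element != 0:
--                 columns[i] = False
--                 break
--     return any(columns)
-- ===== SOURCE B (Python) =====
-- def winningColumns(board):
--     # Maintain the set of candidate columns still all-zero; shrink it row by row.
--     cand = list(range(len(board[0])))
--     for row in board:
--         cand = [i for i in cand if row[i] == 0]
--     return bool(cand)
-- ===== Notes on version B (the rewrite author's own statement) =====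
-- stated objective: alternative
-- what changed: Replaces the per-column scan with an early break by a candidate-set algorithm: start with all column indices, filter out any index whose entry in the current row is nonzero while folding over the rows, and return whether any candidate survives.
-- outside the precondition, e.g. on winningColumns([]): A raises IndexError, B raises IndexError; on winningColumns([[0, 0], [0]]): A raises IndexError, B raises IndexError
import Mathlib
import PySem

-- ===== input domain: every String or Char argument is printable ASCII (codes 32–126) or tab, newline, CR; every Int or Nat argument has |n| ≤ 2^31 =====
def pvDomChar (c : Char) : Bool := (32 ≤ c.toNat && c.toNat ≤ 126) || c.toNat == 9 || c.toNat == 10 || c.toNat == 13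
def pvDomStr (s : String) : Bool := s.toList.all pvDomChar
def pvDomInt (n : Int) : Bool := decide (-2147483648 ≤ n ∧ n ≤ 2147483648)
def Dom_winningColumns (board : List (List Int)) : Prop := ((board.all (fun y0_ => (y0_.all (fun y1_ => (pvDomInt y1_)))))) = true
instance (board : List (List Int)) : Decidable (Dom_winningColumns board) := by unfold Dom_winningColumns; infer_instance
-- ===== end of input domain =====

-- B replaces A's per-column scan with an early break by a candidate-set algorithm:
-- start with all column indices and filter the set row by row, returning whether
-- any candidate survives (objective: alternative).

-- ===== PORT A =====
-- inner 'for element in [row[i] for row in board]: if element != 0: columns[i] = False; break'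
def wcInner (cols : List Bool) (i : Int) : List Int → List Bool
  | [] => cols
  | e :: rest => if e ≠ 0 then PySem.List.pySetD cols i false else wcInner cols i rest

def winningColumns (board : List (List Int)) : Bool :=
  let n : Int := (PySem.List.pyGetD board 0 []).length
  let columns := List.replicate n.toNat true
  let columns := (PySem.List.pyRange 0 n 1).foldl
    (fun cols i => wcInner cols i (board.map (fun row => PySem.List.pyGetD row i 0))) columns
  columns.any id

-- ===== PORT B =====
def winningColumns_alt (board : List (List Int)) : Bool :=
  let cand := PySem.List.pyRange 0 ((PySem.List.pyGetD board 0 []).length : Int) 1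
  let cand := board.foldl
    (fun c row => c.filter (fun i => PySem.List.pyGetD row i 0 == 0)) cand
  !cand.isEmpty

-- ===== PRECONDITION & SPEC =====
-- Pre_ excludes exactly the inputs where Python A raises IndexError: the empty board
-- (board[0]) and ragged boards with some row shorter than row 0 (row[i]).
def Pre_winningColumns (board : List (List Int)) : Prop :=
  board ≠ [] ∧ ∀ row ∈ board, (board.headD []).length ≤ row.length
instance (board : List (List Int)) : Decidable (Pre_winningColumns board) := by
  unfold Pre_winningColumns; infer_instance
def pvWitness_winningColumns : List (List Int) := [[0, 1], [0, 0]]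

def Spec_winningColumns (board : List (List Int)) (out : Bool) : Prop := out = winningColumns_alt board
instance (board : List (List Int)) (out : Bool) : Decidable (Spec_winningColumns board out) := by unfold Spec_winningColumns; infer_instance

-- ===== CLAIM (what is proved, stated in full; the proofs are below) =====
def Claim_equal_winningColumns : Prop := ∀ (board : List (List Int)), Dom_winningColumns board → Pre_winningColumns board → Spec_winningColumns board (winningColumns board)

-- ===== LEMMAS AND PROOFS =====

-- a fold that sets positions to false, read back at position j
theorem fold_set_get (p : Int → Prop) [DecidablePred p] (l : List Int)
    (hl : ∀ i ∈ l, 0 ≤ i) (cols : List Bool) (j : Nat) :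
    (l.foldl (fun c i => if p i then PySem.List.pySetD c i false else c) cols)[j]?
      = if (∃ i ∈ l, p i ∧ i.toNat = j) then (if j < cols.length then some false else none)
        else cols[j]? := by
  induction l generalizing cols with
  | nil => simp
  | cons a l ih =>
    simp only [List.foldl_cons]
    by_cases hpa : p a
    · rw [if_pos hpa, PySem.List.pySetD_of_nonneg _ _ (hl a (by simp)),
        ih (fun i hi => hl i (by simp [hi]))]
      rw [List.getElem?_set]
      simp only [List.length_set]
      by_cases hj : a.toNat = j
      · subst hj
        have : ∃ i ∈ a :: l, p i ∧ i.toNat = a.toNat := ⟨a, by simp, hpa, rfl⟩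
        rw [if_pos this]
        split_ifs <;> simp_all
      · have : (∃ i ∈ a :: l, p i ∧ i.toNat = j) ↔ (∃ i ∈ l, p i ∧ i.toNat = j) := by
          constructor
          · rintro ⟨i, hi, hp, ht⟩
            rcases List.mem_cons.mp hi with rfl | hi
            · exact absurd ht hj
            · exact ⟨i, hi, hp, ht⟩
          · rintro ⟨i, hi, hp, ht⟩; exact ⟨i, by simp [hi], hp, ht⟩
        simp only [this]
        split_ifs with h1 <;> simp
    · rw [if_neg hpa, ih (fun i hi => hl i (by simp [hi]))]
      have : (∃ i ∈ a :: l, p i ∧ i.toNat = j) ↔ (∃ i ∈ l, p i ∧ i.toNat = j) := by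
        constructor
        · rintro ⟨i, hi, hp, ht⟩
          rcases List.mem_cons.mp hi with rfl | hi
          · exact absurd hp hpa
          · exact ⟨i, hi, hp, ht⟩
        · rintro ⟨i, hi, hp, ht⟩; exact ⟨i, by simp [hi], hp, ht⟩
      simp only [this]

-- A's inner loop (with break) only ever writes false once
theorem wcInner_eq (cols : List Bool) (i : Int) (vals : List Int) :
    wcInner cols i vals
      = if (∃ e ∈ vals, e ≠ 0) then PySem.List.pySetD cols i false else cols := by
  induction vals with
  | nil => simp [wcInner]
  | cons e rest ih =>
    by_cases he : e ≠ 0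
    · simp [wcInner, he]
    · simp only [wcInner, if_neg he, ih]
      simp only [ne_eq] at he
      simp [he]

-- an all-true mask of length N with positions C(j) forced false: any = ∃ j < N, ¬ C j
theorem any_mask (N : ℕ) (mask : List Bool)
    (C : ℕ → Prop) [DecidablePred C]
    (hget : ∀ j : ℕ, mask[j]? = if C j then (if j < N then some false else none)
        else (List.replicate N true)[j]?) :
    (mask.any id = true) ↔ ∃ j < N, ¬ C j := by
  constructor
  · rw [List.any_eq_true]
    rintro ⟨x, hx, hid⟩
    simp only [id] at hid; subst hid
    rcases List.mem_iff_getElem.mp hx with ⟨j, hj, hval⟩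
    have h := hget j
    rw [List.getElem?_eq_getElem hj, hval] at h
    by_cases hC : C j
    · rw [if_pos hC] at h
      split_ifs at h; simp_all
    · rw [if_neg hC] at h
      have hjN : j < N := by
        by_contra hge
        rw [List.getElem?_eq_none (by simpa using hge)] at h
        simp at h
      exact ⟨j, hjN, hC⟩
  · rintro ⟨j, hjN, hC⟩
    have h := hget j
    rw [if_neg hC, List.getElem?_replicate, if_pos hjN] at h
    rw [List.any_eq_true]
    exact ⟨true, List.mem_of_getElem? h, rfl⟩

-- B's fold of per-row filters = one filter by the conjunction over all rows
theorem foldl_filter_all (rows : List (List Int)) (cand : List Int) :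
    rows.foldl (fun c row => c.filter (fun i => PySem.List.pyGetD row i 0 == 0)) cand
      = cand.filter (fun i => rows.all (fun row => PySem.List.pyGetD row i 0 == 0)) := by
  induction rows generalizing cand with
  | nil => simp
  | cons row rest ih =>
    simp only [List.foldl_cons, ih, List.filter_filter, List.all_cons]
    congr 1
    funext i
    rw [Bool.and_comm]

-- ===== VERDICT (by name: the statement is the Claim_ definition above) =====
theorem winningColumns_spec : Claim_equal_winningColumns := by
  intro board _ _
  unfold Spec_winningColumns winningColumns winningColumns_alt
  simp only []
  set n : Int := ((PySem.List.pyGetD board 0 []).length : Int) with hn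
  have hn0 : 0 ≤ n := by positivity
  have hrange : ∀ i ∈ PySem.List.pyRange 0 n 1, 0 ≤ i := by
    intro i hi
    exact ((PySem.List.mem_pyRange_one).mp hi).1
  rw [Bool.eq_iff_iff]
  have instA : DecidablePred (fun j : Nat => ∃ i ∈ PySem.List.pyRange 0 n 1,
        (∃ e ∈ board.map (fun row => PySem.List.pyGetD row i 0), e ≠ 0) ∧ i.toNat = j) := by
    infer_instance
  -- characterize side A
  have hA := any_mask n.toNat
    ((PySem.List.pyRange 0 n 1).foldl
      (fun cols i => wcInner cols i (board.map (fun row => PySem.List.pyGetD row i 0)))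
      (List.replicate n.toNat true))
    (fun j => ∃ i ∈ PySem.List.pyRange 0 n 1,
        (∃ e ∈ board.map (fun row => PySem.List.pyGetD row i 0), e ≠ 0) ∧ i.toNat = j)
    (by
      intro j
      simp only [wcInner_eq]
      rw [@fold_set_get (fun i => ∃ e ∈ board.map (fun row => PySem.List.pyGetD row i 0), e ≠ 0)
        (fun i => List.decidableBEx _ _)
        (PySem.List.pyRange 0 n 1) hrange (List.replicate n.toNat true) j]
      simp)
  rw [hA]
  -- characterize side B
  rw [foldl_filter_all, Bool.not_eq_eq_eq_not, Bool.not_true, List.isEmpty_eq_false_iff,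
    ← List.isEmpty_eq_false_iff, List.isEmpty_eq_false_iff_exists_mem]
  constructor
  · rintro ⟨j, hj, hC⟩
    refine ⟨(j : Int), List.mem_filter.mpr ⟨PySem.List.mem_pyRange_one.mpr ⟨by positivity, by omega⟩, ?_⟩⟩
    rw [List.all_eq_true]
    intro row hrow
    rw [beq_iff_eq]
    by_contra hne
    exact hC ⟨(j : Int), PySem.List.mem_pyRange_one.mpr ⟨by positivity, by omega⟩,
      ⟨PySem.List.pyGetD row (j : Int) 0, List.mem_map.mpr ⟨row, hrow, rfl⟩, hne⟩, by simp⟩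
  · rintro ⟨i, hi⟩
    rcases List.mem_filter.mp hi with ⟨hir, hall⟩
    rcases PySem.List.mem_pyRange_one.mp hir with ⟨hi0, hin⟩
    refine ⟨i.toNat, by omega, ?_⟩
    rintro ⟨i', hi', ⟨e, he, hne⟩, ht⟩
    rcases List.mem_map.mp he with ⟨row, hrow, rfl⟩
    have hi'0 : 0 ≤ i' := ((PySem.List.mem_pyRange_one).mp hi').1
    have : i' = i := by omega
    subst this
    rw [List.all_eq_true] at hall
    exact hne (beq_iff_eq.mp (hall row hrow))
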